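-- pv_equiv track=rewrite | github.com/max38744/CodingMaster | 03_Advanced/8739. 전개도 자르기_절망편.py | case1
-- ===== SOURCE A (Python) =====
-- def case1(grid, i, j): # 누운 십자모양(첫째줄)
--     result = 0
--     alpha = 0
--     if i > 7 or j > 6:
--         return result
--     else:
--         result += sum(grid[i+1][j:j+4])
--         for x in range(4):
--             for y in range(4):
--                 tmp = (grid[i][j+x] + grid[i+2][j+y])
--                 alpha = max(alpha, tmp)
--     return result + alpha
-- ===== SOURCE B (Python) =====
-- def case1(grid, i, j):
--     if i > 7 or j > 6:
--         return 0
--     top = grid[i]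
--     mid = grid[i + 1]
--     bot = grid[i + 2]
--     best = max(top[j + k] for k in range(4)) + max(bot[j + k] for k in range(4))
--     return sum(mid[j:j + 4]) + max(best, 0)
-- ===== Notes on version B (the rewrite author's own statement) =====
-- stated objective: simpler
-- what changed: Replaces the 4x4 nested loop maximizing grid[i][j+x]+grid[i+2][j+y] over 16 pairs by two independent 4-element maxima added together (max distributes over +), floored at 0; the middle-row slice sum is kept.
import Mathlib
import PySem

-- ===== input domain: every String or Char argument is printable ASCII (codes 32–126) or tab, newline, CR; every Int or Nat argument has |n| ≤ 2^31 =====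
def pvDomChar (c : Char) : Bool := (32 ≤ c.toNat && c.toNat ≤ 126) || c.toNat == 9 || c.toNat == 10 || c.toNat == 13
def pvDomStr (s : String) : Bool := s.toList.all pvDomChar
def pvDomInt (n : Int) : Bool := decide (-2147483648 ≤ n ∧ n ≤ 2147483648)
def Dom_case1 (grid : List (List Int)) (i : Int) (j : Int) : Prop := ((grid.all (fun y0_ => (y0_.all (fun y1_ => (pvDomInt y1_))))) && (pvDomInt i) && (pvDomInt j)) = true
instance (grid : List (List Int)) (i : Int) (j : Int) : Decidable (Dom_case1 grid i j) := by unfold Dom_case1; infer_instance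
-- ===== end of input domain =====

-- B replaces A's 4×4 nested max-of-sums loop by two 4-element maxima (max distributes over +), a simpler O(8) scan.


-- ===== PORT A =====
def case1 (grid : List (List Int)) (i : Int) (j : Int) : Int :=
  let result : Int := 0
  let alpha : Int := 0
  if 7 < i ∨ 6 < j then result
  else
    let result := result + (PySem.List.slice (PySem.List.pyGetD grid (i+1) []) (some j) (some (j+4))).sum
    let alpha := (PySem.List.pyRange 0 4 1).foldl (fun a x =>
        (PySem.List.pyRange 0 4 1).foldl (fun a2 y =>
          max a2 (PySem.List.pyGetD (PySem.List.pyGetD grid i []) (j+x) 0 +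
                  PySem.List.pyGetD (PySem.List.pyGetD grid (i+2) []) (j+y) 0)) a) alpha
    result + alpha

-- ===== PORT B =====
def case1_alt (grid : List (List Int)) (i : Int) (j : Int) : Int :=
  if 7 < i ∨ 6 < j then 0
  else
    let top := PySem.List.pyGetD grid i []
    let mid := PySem.List.pyGetD grid (i+1) []
    let bot := PySem.List.pyGetD grid (i+2) []
    let mTop := (PySem.List.pyRange 1 4 1).foldl
        (fun a k => max a (PySem.List.pyGetD top (j+k) 0)) (PySem.List.pyGetD top (j+0) 0)
    let mBot := (PySem.List.pyRange 1 4 1).foldl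
        (fun a k => max a (PySem.List.pyGetD bot (j+k) 0)) (PySem.List.pyGetD bot (j+0) 0)
    (PySem.List.slice mid (some j) (some (j+4))).sum + max (mTop + mBot) 0

-- ===== PRECONDITION & SPEC =====
-- Pre_ excludes exactly the inputs where Python A raises IndexError (row i, i+1 or i+2,
-- or one of the four element indices j..j+3 in rows i and i+2, out of Python range).
def Pre_case1 (grid : List (List Int)) (i : Int) (j : Int) : Prop :=
  (7 < i ∨ 6 < j) ∨
  (PySem.Raise.InRange grid.length (i+1) ∧ PySem.Raise.InRange grid.length i ∧
   PySem.Raise.InRange grid.length (i+2) ∧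
   ∀ k ∈ [(0:Int), 1, 2, 3],
     PySem.Raise.InRange (PySem.List.pyGetD grid i []).length (j+k) ∧
     PySem.Raise.InRange (PySem.List.pyGetD grid (i+2) []).length (j+k))
instance (grid : List (List Int)) (i : Int) (j : Int) : Decidable (Pre_case1 grid i j) := by
  unfold Pre_case1; infer_instance

def pvWitness_case1 : List (List Int) × Int × Int :=
  ([[1, 2, 3, 4], [5, 6, 7, 8], [9, 10, 11, 12]], 0, 0)

def Spec_case1 (grid : List (List Int)) (i : Int) (j : Int) (out : Int) : Prop := out = case1_alt grid i j
instance (grid : List (List Int)) (i : Int) (j : Int) (out : Int) : Decidable (Spec_case1 grid i j out) := by unfold Spec_case1; infer_instance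

-- ===== CLAIM (what is proved, stated in full; the proofs are below) =====
def Claim_equal_case1 : Prop := ∀ (grid : List (List Int)) (i : Int) (j : Int), Dom_case1 grid i j → Pre_case1 grid i j → Spec_case1 grid i j (case1 grid i j)

-- ===== LEMMAS AND PROOFS =====

-- max over one row of pairwise sums folds to adding the row maximum
theorem max_row (c a b0 b1 b2 b3 : Int) :
    max (max (max (max c (a+b0)) (a+b1)) (a+b2)) (a+b3)
    = max c (a + max (max (max b0 b1) b2) b3) := by omega

-- the heart of the change: the outer fold of row maxima is the sum of the two maxima
theorem max_col (a0 a1 a2 a3 m : Int) :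
    max (max (max (max 0 (a0+m)) (a1+m)) (a2+m)) (a3+m)
    = max (max (max (max a0 a1) a2) a3 + m) 0 := by omega

-- ===== VERDICT (by name: the statement is the Claim_ definition above) =====
theorem case1_spec : Claim_equal_case1 := by
  intro grid i j _ _
  unfold Spec_case1 case1 case1_alt
  by_cases h : 7 < i ∨ 6 < j
  · simp [h]
  · simp only [h, if_false]
    have hr : PySem.List.pyRange 0 4 1 = [0, 1, 2, 3] := by decide
    have hr' : PySem.List.pyRange 1 4 1 = [1, 2, 3] := by decide
    simp only [hr, hr', List.foldl]
    simp only [max_row, max_col]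
    ring_nf
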